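-- pv_equiv track=rewrite | github.com/Veer-Raghava/april28 | tools/pdf_tools.py | _find_table_block_start
-- ===== SOURCE A (Python) =====
-- def _find_table_block_start(text: str) -> int:
--     lines = text.splitlines(keepends=True)
--     pos = len(text)
--     in_tbl = False
--     for line in reversed(lines):
--         if "|" in line:
--             pos -= len(line); in_tbl = True
--         elif in_tbl:
--             break
--         else:
--             pos -= len(line)
--     return max(0, pos)
-- ===== SOURCE B (Python) =====
-- def _find_table_block_start(text: str) -> int:
--     offset = 0
--     run_start = 0
--     answer = 0
--     prev_bar = False
--     for line in text.splitlines(keepends=True):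
--         if "|" in line:
--             if not prev_bar:
--                 run_start = offset
--             answer = run_start
--             prev_bar = True
--         else:
--             prev_bar = False
--         offset += len(line)
--     return answer
-- ===== Notes on version B (the rewrite author's own statement) =====
-- stated objective: alternative
-- what changed: Replaces A's reversed-line scan with a position accumulator, an in-table flag, an early break and a final max(0,...) by a single forward pass that tracks the running byte offset, the start offset of the current run of table lines and the answer (start of the last such run), needing no reversal, no break and no clamping.
import Mathlib
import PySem

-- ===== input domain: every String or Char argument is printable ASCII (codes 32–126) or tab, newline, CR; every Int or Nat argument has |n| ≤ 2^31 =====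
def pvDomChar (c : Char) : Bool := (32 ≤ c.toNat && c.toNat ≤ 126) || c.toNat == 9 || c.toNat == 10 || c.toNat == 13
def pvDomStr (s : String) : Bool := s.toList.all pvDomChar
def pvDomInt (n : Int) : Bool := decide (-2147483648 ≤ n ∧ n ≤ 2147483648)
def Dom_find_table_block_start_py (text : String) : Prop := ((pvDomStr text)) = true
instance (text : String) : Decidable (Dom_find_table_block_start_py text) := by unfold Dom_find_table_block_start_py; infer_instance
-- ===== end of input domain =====

-- B replaces A's reversed scan with early break and final max() by a single forward
-- pass tracking the current run's start offset (objective: alternative decomposition).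


-- shared helper: text.splitlines(keepends=True).  PySem only provides keepends=False,
-- so this is a hand port; it is exact on the domain above, where the only line
-- breaks Python recognises are '\n', '\r' and '\r\n'.
def splitKeep (acc : List Char) : List Char → List (List Char)
  | [] => if acc = [] then [] else [acc.reverse]
  | '\r' :: '\n' :: t => (acc.reverse ++ ['\r', '\n']) :: splitKeep [] t
  | '\r' :: t => (acc.reverse ++ ['\r']) :: splitKeep [] t
  | '\n' :: t => (acc.reverse ++ ['\n']) :: splitKeep [] t
  | c :: t => splitKeep (c :: acc) t

-- ===== PORT A =====
-- the 'for line in reversed(lines)' loop with its break, state (pos, in_tbl)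
def aLoop : List (List Char) → Int → Bool → Int
  | [], pos, _ => pos
  | l :: t, pos, tbl =>
    if PySem.Chars.isIn ['|'] l then aLoop t (pos - (l.length : Int)) true
    else if tbl then pos
    else aLoop t (pos - (l.length : Int)) false

def find_table_block_start_py (text : String) : Int :=
  max 0 (aLoop (splitKeep [] text.toList).reverse (PySem.Str.len text) false)

-- ===== PORT B =====
-- one forward step: state (offset, run_start, answer, prev_bar)
def bStep (s : Int × Int × Int × Bool) (l : List Char) : Int × Int × Int × Bool :=
  match s with
  | (off, rs, ans, pb) =>
    if PySem.Chars.isIn ['|'] l then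
      let rs' := if pb then rs else off
      (off + (l.length : Int), rs', rs', true)
    else (off + (l.length : Int), rs, ans, false)

def find_table_block_start_py_alt (text : String) : Int :=
  ((splitKeep [] text.toList).foldl bStep (0, 0, 0, false)).2.2.1

-- ===== PRECONDITION & SPEC =====
def Spec_find_table_block_start_py (text : String) (out : Int) : Prop := out = find_table_block_start_py_alt text
instance (text : String) (out : Int) : Decidable (Spec_find_table_block_start_py text out) := by unfold Spec_find_table_block_start_py; infer_instance

-- ===== CLAIM (what is proved, stated in full; the proofs are below) =====
def Claim_equal_find_table_block_start_py : Prop := ∀ (text : String), Dom_find_table_block_start_py text → Spec_find_table_block_start_py text (find_table_block_start_py text)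

-- ===== LEMMAS AND PROOFS =====

-- total length of the kept-ends lines is the length of the text
theorem splitKeep_flatten (acc cs : List Char) : (splitKeep acc cs).flatten = acc.reverse ++ cs := by
  induction acc, cs using splitKeep.induct <;> simp [splitKeep, *]

def sumLen (ls : List (List Char)) : Int := ((ls.map List.length).sum : Nat)

-- joint invariant tying A's reversed loop to B's forward fold
theorem main_inv (ls : List (List Char)) :
    (ls.foldl bStep (0, 0, 0, false)).1 = sumLen ls ∧
    0 ≤ (ls.foldl bStep (0, 0, 0, false)).2.1 ∧
    0 ≤ (ls.foldl bStep (0, 0, 0, false)).2.2.1 ∧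
    aLoop ls.reverse (sumLen ls) false = (ls.foldl bStep (0, 0, 0, false)).2.2.1 ∧
    aLoop ls.reverse (sumLen ls) true =
      (if (ls.foldl bStep (0, 0, 0, false)).2.2.2 then (ls.foldl bStep (0, 0, 0, false)).2.1
       else sumLen ls) := by
  induction ls using List.reverseRecOn with
  | nil => simp [aLoop, sumLen]
  | append_singleton p l ih =>
    rcases hF : List.foldl bStep (0, 0, 0, false) p with ⟨off, rs, ans, pb⟩
    rw [hF] at ih
    obtain ⟨h1, h2, h3, h4, h5⟩ := ih
    have hsum : sumLen (p ++ [l]) = sumLen p + (l.length : Int) := by simp [sumLen]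
    have hcan : sumLen p + (l.length : Int) - (l.length : Int) = sumLen p := by ring
    rw [List.foldl_append, hF]
    simp only [List.reverse_append, List.reverse_singleton, List.singleton_append,
      List.foldl_cons, List.foldl_nil, hsum]
    by_cases hb : PySem.Chars.isIn ['|'] l = true
    · simp only [bStep, hb, if_true, aLoop, hcan, h4, h5]
      cases pb <;> simp_all
      simp [sumLen]
      exact List.sum_nonneg (by simp)
    · simp only [bStep, hb, if_false, aLoop, hcan, h4, h5, Bool.false_eq_true]
      simp_all

-- ===== VERDICT (by name: the statement is the Claim_ definition above) =====
theorem find_table_block_start_py_spec : Claim_equal_find_table_block_start_py := by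
  intro text _
  unfold Spec_find_table_block_start_py find_table_block_start_py find_table_block_start_py_alt
  set ls := splitKeep [] text.toList with hls
  have hlen : PySem.Str.len text = sumLen ls := by
    have hf : ls.flatten = text.toList := by simpa using splitKeep_flatten [] text.toList
    have : ls.flatten.length = (ls.map List.length).sum := List.length_flatten (L := ls)
    simp [PySem.Str.len, sumLen, ← this, hf]
  obtain ⟨_, _, h3, h4, _⟩ := main_inv ls
  rw [hlen, h4]
  omega
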